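-- pv_equiv track=rewrite | github.com/ritikalama0815/bioinformatics | tmdomain.py | highlighted_transmembrane
-- ===== SOURCE A (Python) =====
-- def highlighted_transmembrane(sequence, transmembrane_region):
--     highlighted = ""
--     # returns the amino acid sequence with the transmembrane region highlighted in green
--     for i, amino_acid in enumerate(sequence, start=1):
--         if any(start <= i <= end for start, end, _ in transmembrane_region):
--             highlighted += "\033[92m" + amino_acid + "\033[0m"
--         else:
--             highlighted += amino_acid
--     return highlighted
-- ===== SOURCE B (Python) =====
-- def highlighted_transmembrane(sequence, transmembrane_region):
--     # Difference-array sweep: O(n + m) instead of testing every region per residue.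
--     n = len(sequence)
--     diff = [0] * (n + 1)
--     for start, end, _ in transmembrane_region:
--         lo = max(start, 1)
--         hi = min(end, n)
--         if lo <= hi:
--             diff[lo - 1] += 1
--             diff[hi] -= 1
--     parts = []
--     level = 0
--     for i, aa in enumerate(sequence):
--         level += diff[i]
--         parts.append("\033[92m" + aa + "\033[0m" if level > 0 else aa)
--     return "".join(parts)
-- ===== Notes on version B (the rewrite author's own statement) =====
-- stated objective: faster
-- what changed: Replaces the per-character scan of all regions (any(...) inside the loop) with a difference array marked once per region followed by a single running-sum sweep over the sequence.
import Mathlib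
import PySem

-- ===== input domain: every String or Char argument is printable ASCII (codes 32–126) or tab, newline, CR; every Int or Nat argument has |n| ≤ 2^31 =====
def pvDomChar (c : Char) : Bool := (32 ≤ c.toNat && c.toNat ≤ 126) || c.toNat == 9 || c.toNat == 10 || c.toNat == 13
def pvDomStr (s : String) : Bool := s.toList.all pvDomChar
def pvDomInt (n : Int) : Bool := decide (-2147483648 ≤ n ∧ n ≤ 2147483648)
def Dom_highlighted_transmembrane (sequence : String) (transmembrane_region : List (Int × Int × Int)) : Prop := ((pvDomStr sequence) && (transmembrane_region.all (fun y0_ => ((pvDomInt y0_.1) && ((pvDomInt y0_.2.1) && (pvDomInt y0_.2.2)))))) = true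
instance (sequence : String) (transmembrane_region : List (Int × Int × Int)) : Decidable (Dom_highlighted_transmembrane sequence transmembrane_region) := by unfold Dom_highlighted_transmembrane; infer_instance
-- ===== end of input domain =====

-- B replaces A's per-character scan of all regions by a difference array marked once per
-- region and a single running-sum sweep over the sequence (objective: faster).

-- ===== PORT A =====
-- "\033[92m" + aa + "\033[0m", as a list of chars around aa
def pvChunk (c : Char) : List Char :=
  ['\x1b', '[', '9', '2', 'm', c, '\x1b', '[', '0', 'm']

def highlighted_transmembrane (sequence : String) (transmembrane_region : List (Int × Int × Int)) : String :=
  String.mk ((PySem.List.enumerate sequence.toList 1).foldl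
    (fun acc p =>
      if transmembrane_region.any (fun r => decide (r.1 ≤ p.1 ∧ p.1 ≤ r.2.1)) then
        acc ++ pvChunk p.2
      else
        acc ++ [p.2]) [])

-- ===== PORT B =====
-- the body of Source B's marking loop: clamp the region to [1, n] and mark diff
def pvStep (n : Nat) (d : List Int) (r : Int × Int × Int) : List Int :=
  let lo := max r.1 1
  let hi := min r.2.1 (n : Int)
  if lo ≤ hi then (d.modify (lo - 1).toNat (· + 1)).modify hi.toNat (· + (-1)) else d

-- diff = [0] * (n + 1); for start, end, _ in transmembrane_region: …
def pvDiffArr (n : Nat) (transmembrane_region : List (Int × Int × Int)) : List Int :=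
  transmembrane_region.foldl (pvStep n) (List.replicate (n + 1) 0)

-- for i, aa in enumerate(sequence): level += diff[i]; parts.append(…)
-- (diff[i] is always in range in Source B, so getD is exact here)
def pvSweep (diff : List Int) : List Char → Nat → Int → List Char
  | [], _, _ => []
  | c :: cs, i, level =>
    let level' := level + diff.getD i 0
    (if 0 < level' then pvChunk c else [c]) ++ pvSweep diff cs (i + 1) level'

def highlighted_transmembrane_alt (sequence : String) (transmembrane_region : List (Int × Int × Int)) : String :=
  String.mk (pvSweep (pvDiffArr sequence.toList.length transmembrane_region) sequence.toList 0 0)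

-- ===== PRECONDITION & SPEC =====
def Spec_highlighted_transmembrane (sequence : String) (transmembrane_region : List (Int × Int × Int)) (out : String) : Prop := out = highlighted_transmembrane_alt sequence transmembrane_region
instance (sequence : String) (transmembrane_region : List (Int × Int × Int)) (out : String) : Decidable (Spec_highlighted_transmembrane sequence transmembrane_region out) := by unfold Spec_highlighted_transmembrane; infer_instance

-- ===== CLAIM (what is proved, stated in full; the proofs are below) =====
def Claim_equal_highlighted_transmembrane : Prop := ∀ (sequence : String) (transmembrane_region : List (Int × Int × Int)), Dom_highlighted_transmembrane sequence transmembrane_region → Spec_highlighted_transmembrane sequence transmembrane_region (highlighted_transmembrane sequence transmembrane_region)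

-- ===== LEMMAS AND PROOFS =====

-- canonical per-character rendering, indexed by the 1-based position
def pvRender (rs : List (Int × Int × Int)) : List Char → Int → List Char
  | [], _ => []
  | c :: cs, k =>
    (if rs.any (fun r => decide (r.1 ≤ k ∧ k ≤ r.2.1)) then pvChunk c else [c]) ++ pvRender rs cs (k + 1)

theorem a_eq_render (rs : List (Int × Int × Int)) (cs : List Char) :
    ∀ (k : Int) (acc : List Char),
      (PySem.List.enumerate cs k).foldl
        (fun acc p =>
          if rs.any (fun r => decide (r.1 ≤ p.1 ∧ p.1 ≤ r.2.1)) then acc ++ pvChunk p.2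
          else acc ++ [p.2]) acc = acc ++ pvRender rs cs k := by
  induction cs with
  | nil => intro k acc; simp [PySem.List.enumerate_nil, pvRender]
  | cons c cs ih =>
    intro k acc
    rw [PySem.List.enumerate_cons]
    simp only [List.foldl_cons, ih (k + 1), pvRender]
    split <;> simp

theorem sum_take_modify (c : Int) (d : List Int) :
    ∀ (j k : Nat),
      ((d.modify j (· + c)).take k).sum
        = (d.take k).sum + (if j < k ∧ j < d.length then c else 0) := by
  induction d with
  | nil => intro j k; simp
  | cons x d ih =>
    intro j k
    cases k with
    | zero => simp
    | succ k =>
      rw [List.modify_cons]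
      cases j with
      | zero =>
        rw [if_pos rfl, List.take_succ_cons, List.take_succ_cons, List.sum_cons, List.sum_cons,
          if_pos (show 0 < k + 1 ∧ 0 < (x :: d).length from ⟨by omega, by simp⟩)]
        ring
      | succ j =>
        rw [if_neg (by omega), List.take_succ_cons, List.take_succ_cons, List.sum_cons,
          List.sum_cons, Nat.add_sub_cancel, ih j k]
        have h2 : (j + 1 < k + 1 ∧ j + 1 < (x :: d).length) ↔ (j < k ∧ j < d.length) := by
          simp only [List.length_cons]; omega
        rw [if_congr h2 rfl rfl]
        ring

theorem length_pvStep (n : Nat) (d : List Int) (r : Int × Int × Int) :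
    (pvStep n d r).length = d.length := by
  unfold pvStep; dsimp only; split <;> simp

theorem sum_take_foldl_pvStep (n : Nat) (i : Nat) (hi : i < n) (rs : List (Int × Int × Int)) :
    ∀ d : List Int, d.length = n + 1 →
      ((rs.foldl (pvStep n) d).take (i + 1)).sum
        = (d.take (i + 1)).sum
          + ((rs.filter (fun r => decide (r.1 ≤ (i : Int) + 1 ∧ (i : Int) + 1 ≤ r.2.1))).length : Int) := by
  induction rs with
  | nil => intro d _; simp
  | cons r rs ih =>
    intro d hd
    rw [List.foldl_cons, ih (pvStep n d r) (by rw [length_pvStep, hd])]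
    have hstep : ((pvStep n d r).take (i + 1)).sum
        = (d.take (i + 1)).sum
          + (if r.1 ≤ (i : Int) + 1 ∧ (i : Int) + 1 ≤ r.2.1 then 1 else 0) := by
      unfold pvStep; dsimp only
      split
      · next hle =>
        rw [sum_take_modify, List.length_modify, sum_take_modify, hd]
        split_ifs <;> omega
      · next hgt =>
        rw [if_neg (by intro h; exact hgt (by omega))]; ring
    rw [hstep, List.filter_cons]
    by_cases h : r.1 ≤ (i : Int) + 1 ∧ (i : Int) + 1 ≤ r.2.1
    · rw [if_pos h, if_pos (by simpa using h)]; push_cast [List.length_cons]; ring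
    · rw [if_neg h, if_neg (by simpa using h)]; ring

theorem length_pvDiffArr (n : Nat) (rs : List (Int × Int × Int)) :
    (pvDiffArr n rs).length = n + 1 := by
  unfold pvDiffArr
  have h : ∀ (l : List (Int × Int × Int)) (d : List Int),
      (l.foldl (pvStep n) d).length = d.length := by
    intro l
    induction l with
    | nil => intro d; rfl
    | cons r l ih => intro d; rw [List.foldl_cons, ih, length_pvStep]
  rw [h]; simp

theorem sweep_eq_render (n : Nat) (rs : List (Int × Int × Int)) (cs : List Char) :
    ∀ (i : Nat) (level : Int), i + cs.length = n →
      level = ((pvDiffArr n rs).take i).sum →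
      pvSweep (pvDiffArr n rs) cs i level = pvRender rs cs ((i : Int) + 1) := by
  induction cs with
  | nil => intro i level _ _; simp [pvSweep, pvRender]
  | cons c cs ih =>
    intro i level hn hlev
    have hilt : i < n := by simp at hn; omega
    have hlen : (pvDiffArr n rs).length = n + 1 := length_pvDiffArr n rs
    have hget : (pvDiffArr n rs).getD i 0 = (pvDiffArr n rs)[i]'(by omega) :=
      List.getD_eq_getElem _ _ (by omega)
    have hsum1 : ((pvDiffArr n rs).take (i + 1)).sum
        = ((pvDiffArr n rs).take i).sum + (pvDiffArr n rs)[i]'(by omega) := by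
      rw [List.take_add_one, List.getElem?_eq_getElem (by omega), Option.toList_some,
        List.sum_append, List.sum_cons, List.sum_nil]
      ring
    have hlev2 : level + (pvDiffArr n rs).getD i 0 = ((pvDiffArr n rs).take (i + 1)).sum := by
      rw [hlev, hget, hsum1]
    have hcount : ((pvDiffArr n rs).take (i + 1)).sum
        = ((rs.filter (fun r => decide (r.1 ≤ (i : Int) + 1 ∧ (i : Int) + 1 ≤ r.2.1))).length : Int) := by
      unfold pvDiffArr
      rw [sum_take_foldl_pvStep n i hilt rs _ (by simp)]
      simp
    show (if 0 < level + (pvDiffArr n rs).getD i 0 then pvChunk c else [c])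
        ++ pvSweep (pvDiffArr n rs) cs (i + 1) (level + (pvDiffArr n rs).getD i 0)
      = _
    rw [ih (i + 1) _ (by simp at hn ⊢; omega) hlev2, hlev2, hcount]
    have hif : (0 < ((rs.filter (fun r => decide (r.1 ≤ (i : Int) + 1 ∧ (i : Int) + 1 ≤ r.2.1))).length : Int))
        = (rs.any (fun r => decide (r.1 ≤ (i : Int) + 1 ∧ (i : Int) + 1 ≤ r.2.1)) = true) := by
      apply propext
      rw [Int.natCast_pos, List.length_pos_iff, ne_eq, List.filter_eq_nil_iff, List.any_eq_true]
      push_neg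
      constructor
      · rintro ⟨r, hr, h⟩; exact ⟨r, hr, by simpa using h⟩
      · rintro ⟨r, hr, h⟩; exact ⟨r, hr, by simpa using h⟩
    rw [pvRender]
    simp only [hif]
    norm_cast

-- ===== VERDICT (by name: the statement is the Claim_ definition above) =====
theorem highlighted_transmembrane_spec : Claim_equal_highlighted_transmembrane := by
  intro s rs _
  unfold Spec_highlighted_transmembrane highlighted_transmembrane highlighted_transmembrane_alt
  rw [a_eq_render, sweep_eq_render s.toList.length rs s.toList 0 0 (by simp) (by simp)]
  simp
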